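-- pv_equiv track=rewrite | github.com/blockcypher/blockcypher-python | blockcypher/utils.py | safe_trim
-- ===== SOURCE A (Python) =====
-- def safe_trim(qty_as_string):
--     '''
--     Safe trimming means the following:
--         1.0010000 -> 1.001
--         1.0 -> 1.0 (no change)
--         1.0000001 -> 1.0000001 (no change)
--     '''
--     qty_formatted = qty_as_string
--     if '.' in qty_as_string:
--         # only affect numbers with decimals
--         while True:
--             if qty_formatted[-1] == '0' and qty_formatted[-2] != '.':
--                 qty_formatted = qty_formatted[:-1]
--             else:
--                 break
--
--     return qty_formatted
-- ===== SOURCE B (Python) =====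
-- def safe_trim(qty_as_string):
--     if '.' not in qty_as_string:
--         return qty_as_string
--     head, frac = qty_as_string.rsplit('.', 1)
--     stripped = frac.rstrip('0')
--     if frac and not stripped:
--         stripped = '0'
--     return head + '.' + stripped
-- ===== Notes on version B (the rewrite author's own statement) =====
-- stated objective: simpler
-- what changed: Replaces A's while-loop that re-slices the whole string one trailing zero at a time with a single rsplit on the last dot plus one rstrip of zeros from the fractional part, restoring a single zero digit when the fraction was all zeros.
import Mathlib
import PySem

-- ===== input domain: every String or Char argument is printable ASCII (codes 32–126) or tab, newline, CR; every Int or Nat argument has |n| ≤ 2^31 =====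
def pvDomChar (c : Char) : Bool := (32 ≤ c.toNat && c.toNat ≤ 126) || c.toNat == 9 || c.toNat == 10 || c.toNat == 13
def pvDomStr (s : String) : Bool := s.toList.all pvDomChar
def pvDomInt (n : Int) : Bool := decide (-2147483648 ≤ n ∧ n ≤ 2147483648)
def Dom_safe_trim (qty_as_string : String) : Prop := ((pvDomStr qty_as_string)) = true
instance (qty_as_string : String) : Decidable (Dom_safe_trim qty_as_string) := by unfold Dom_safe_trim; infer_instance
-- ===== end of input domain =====

-- B strips the fractional part after the last dot in one pass instead of A's loop that re-slices the whole string; return values proved equal.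

-- ===== PORT A =====
-- the 'while True' loop of A: drop the last char while it is '0' and the one before it is not '.'
def safeTrimLoopA (qty_formatted : List Char) : List Char :=
  if h : PySem.List.pyGet? qty_formatted (-1) = some '0' ∧
         PySem.List.pyGet? qty_formatted (-2) ≠ some '.' then
    safeTrimLoopA (PySem.List.slice qty_formatted none (some (-1)))   -- qty_formatted[:-1]
  else
    qty_formatted
termination_by qty_formatted.length
decreasing_by
  rw [PySem.List.slice_to_neg_one]
  have hne : qty_formatted ≠ [] := by
    intro hnil; rw [hnil] at h; simp [PySem.List.pyGet?, PySem.List.pyIdx?] at h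
  cases qty_formatted with
  | nil => exact absurd rfl hne
  | cons a t => simp [List.length_dropLast]

def safe_trim (qty_as_string : String) : String :=
  if PySem.Str.isIn "." qty_as_string then
    String.ofList (safeTrimLoopA qty_as_string.toList)
  else
    qty_as_string

-- ===== PORT B =====
-- rsplit('.', 1) and rstrip('0') are ported by hand on the reversed character list
-- (exact: for a string containing '.', the rsplit fraction is the maximal dot-free suffix).
def safe_trim_alt (qty_as_string : String) : String :=
  if PySem.Str.isIn "." qty_as_string then
    let rev := qty_as_string.toList.reverse
    let fracRev := rev.takeWhile (fun c => c != '.')          -- frac (reversed)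
    let headRev := (rev.dropWhile (fun c => c != '.')).tail   -- head (reversed)
    let strippedRev := fracRev.dropWhile (fun c => c == '0')  -- frac.rstrip('0') (reversed)
    let fixedRev := if fracRev ≠ [] ∧ strippedRev = [] then ['0'] else strippedRev
    String.ofList (headRev.reverse ++ '.' :: fixedRev.reverse)  -- head + '.' + stripped
  else
    qty_as_string

-- ===== PRECONDITION & SPEC =====
def Spec_safe_trim (qty_as_string : String) (out : String) : Prop := out = safe_trim_alt qty_as_string
instance (qty_as_string : String) (out : String) : Decidable (Spec_safe_trim qty_as_string out) := by unfold Spec_safe_trim; infer_instance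

-- ===== CLAIM (what is proved, stated in full; the proofs are below) =====
def Claim_equal_safe_trim : Prop := ∀ (qty_as_string : String), Dom_safe_trim qty_as_string → Spec_safe_trim qty_as_string (safe_trim qty_as_string)

-- ===== LEMMAS AND PROOFS =====

theorem pyGet?_neg_two_append (xs : List Char) (y x : Char) :
    PySem.List.pyGet? (xs ++ [y, x]) (-2) = some y := by
  have hlen : 2 ≤ (xs ++ [y, x]).length := by simp
  rw [PySem.List.pyGet?_neg_ofNat _ 2 (by omega) hlen]
  simp

-- A's loop on a string written as (fr ++ '.' :: hd).reverse with fr dot-free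
theorem safeTrimLoopA_decomp (fr hd : List Char) (hfr : '.' ∉ fr) :
    safeTrimLoopA ((fr ++ '.' :: hd).reverse) =
      ((if fr ≠ [] ∧ fr.dropWhile (fun c => c == '0') = [] then ['0']
        else fr.dropWhile (fun c => c == '0')) ++ '.' :: hd).reverse := by
  induction fr with
  | nil =>
      rw [safeTrimLoopA]
      simp [PySem.List.pyGet?_neg_one_append_singleton]
  | cons c t ih =>
      by_cases hc : c = '0'
      · subst hc
        cases t with
        | nil =>
            rw [safeTrimLoopA]
            have h2 : PySem.List.pyGet? (('0' :: ([] : List Char) ++ '.' :: hd).reverse) (-2) = some '.' := by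
              have hsh : ('0' :: ([] : List Char) ++ '.' :: hd).reverse = hd.reverse ++ ['.', '0'] := by simp
              rw [hsh]; exact pyGet?_neg_two_append _ _ _
            rw [dif_neg (fun hco => hco.2 h2)]
            simp [List.dropWhile]
        | cons d r =>
            rw [safeTrimLoopA]
            have hsh : ('0' :: d :: r ++ '.' :: hd).reverse
                = ((r ++ '.' :: hd).reverse ++ [d]) ++ ['0'] := by simp
            rw [dif_pos ?hcond]
            case hcond =>
              refine ⟨?_, ?_⟩
              · rw [hsh]; exact PySem.List.pyGet?_neg_one_append_singleton _ _
              · have hd' : d ≠ '.' := by intro h; exact hfr (by simp [h])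
                have h2 : PySem.List.pyGet? (('0' :: d :: r ++ '.' :: hd).reverse) (-2) = some d := by
                  have hsh2 : ('0' :: d :: r ++ '.' :: hd).reverse
                      = (r ++ '.' :: hd).reverse ++ [d, '0'] := by simp
                  rw [hsh2]; exact pyGet?_neg_two_append _ _ _
                rw [h2]
                intro hco; exact hd' (by injection hco)
            rw [PySem.List.slice_to_neg_one]
            have hdl : (('0' :: d :: r ++ '.' :: hd).reverse).dropLast
                = ((d :: r ++ '.' :: hd).reverse) := by
              rw [hsh, List.dropLast_concat]; simp
            rw [hdl, ih (by intro h; exact hfr (List.mem_cons_of_mem _ h))]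
            have hdd : List.dropWhile (fun c => c == '0') ('0' :: d :: r)
                = List.dropWhile (fun c => c == '0') (d :: r) := by simp
            rw [hdd]
            simp
      · rw [safeTrimLoopA]
        have hsh : ((c :: t ++ '.' :: hd).reverse)
            = ((t ++ '.' :: hd).reverse) ++ [c] := by simp
        rw [dif_neg ?hnc]
        case hnc =>
          intro hcontra
          rcases hcontra with ⟨h1, _⟩
          rw [hsh, PySem.List.pyGet?_neg_one_append_singleton] at h1
          exact hc (by injection h1)
        simp [hc]

-- the decomposition of any character list containing '.' (reversed view)
theorem rev_decomp (l : List Char) (h : '.' ∈ l) :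
    l.reverse = (l.reverse.takeWhile (fun c => c != '.')) ++
      '.' :: (l.reverse.dropWhile (fun c => c != '.')).tail ∧
    '.' ∉ l.reverse.takeWhile (fun c => c != '.') := by
  have hmem : '.' ∈ l.reverse := by simpa using h
  have hdw : '.' ∈ l.reverse.dropWhile (fun c => c != '.') := by
    rcases (List.takeWhile_append_dropWhile (p := fun c => c != '.') (l := l.reverse)) with h0
    by_contra hnot
    have hmem2 : '.' ∈ l.reverse.takeWhile (fun c => c != '.') := by
      rw [← h0] at hmem
      rcases List.mem_append.mp hmem with h1 | h1
      · exact h1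
      · exact absurd h1 hnot
    have := List.mem_takeWhile_imp hmem2
    simp at this
  have hhead : (l.reverse.dropWhile (fun c => c != '.')).head? = some '.' := by
    cases hcase : l.reverse.dropWhile (fun c => c != '.') with
    | nil => rw [hcase] at hdw; simp at hdw
    | cons a t =>
        have hh := List.head?_dropWhile_not (p := fun c => c != '.') (l := l.reverse)
        rw [hcase] at hh
        simp at hh
        simp [hh]
  constructor
  · conv_lhs => rw [← List.takeWhile_append_dropWhile (p := fun c => c != '.') (l := l.reverse)]
    congr 1
    cases hcase : l.reverse.dropWhile (fun c => c != '.') with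
    | nil => rw [hcase] at hhead; simp at hhead
    | cons a t =>
        rw [hcase] at hhead
        simp at hhead
        simp [hhead]
  · intro hmem'
    have := List.mem_takeWhile_imp hmem'
    simp at this

-- ===== VERDICT (by name: the statement is the Claim_ definition above) =====
theorem safe_trim_spec : Claim_equal_safe_trim := by
  intro s _
  unfold Spec_safe_trim safe_trim safe_trim_alt
  by_cases hin : PySem.Str.isIn "." s
  · rw [if_pos hin, if_pos hin]
    have hmem : '.' ∈ s.toList := by
      have hinf := (PySem.Str.isIn_iff_infix (sub := ".") (s := s)).mp hin
      exact hinf.mem (show ('.' : Char) ∈ ".".toList by decide)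
    obtain ⟨hdec, hfr⟩ := rev_decomp s.toList hmem
    have hlist : s.toList = ((s.toList.reverse.takeWhile (fun c => c != '.')) ++
        '.' :: (s.toList.reverse.dropWhile (fun c => c != '.')).tail).reverse := by
      rw [← hdec]; simp
    conv_lhs => rw [hlist, safeTrimLoopA_decomp _ _ hfr]
    simp only [List.reverse_append, List.reverse_cons, List.append_assoc,
      List.cons_append, List.nil_append]
  · rw [if_neg hin, if_neg hin]
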